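-- pv_equiv track=rewrite | github.com/Here2peer/battlestatsbackend | Battlerite/teams.py | prepare_multiple_query_strings
-- ===== SOURCE A (Python) =====
-- def prepare_multiple_query_strings(team_members):
--     all_teammates = []  # prepare a list for strings
--     player_to_be_processed = 1
--     for member in team_members:
--         if player_to_be_processed % 6 == 0:
--             member_string = member
--         else:
--             member_string = member + ','
--
--         teammate_list_index = int((player_to_be_processed - 1) / 6)
--         if teammate_list_index == len(all_teammates):
--             all_teammates.append('')
--         all_teammates[teammate_list_index] += member_string
--
--         player_to_be_processed += 1
--
--     if len(all_teammates)!=0: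
--         if player_to_be_processed > 1:
--             last_id_string = all_teammates[int((player_to_be_processed - 2) / 6)]
--         else:
--             last_id_string = all_teammates[0]
--         if last_id_string[-1] == ',':  # remove last comma if present
--             all_teammates[int((player_to_be_processed - 2) / 6)] = last_id_string[:-1]
--     return all_teammates
-- ===== SOURCE B (Python) =====
-- def prepare_multiple_query_strings(team_members):
--     members = list(team_members)
--     return [','.join(members[i:i + 6]) for i in range(0, len(members), 6)]
-- ===== Notes on version B (the rewrite author's own statement) =====
-- stated objective: simpler
-- what changed: B replaces A's per-element modular counter, lazy '' appends, in-place string accumulation and end-of-loop trailing-comma stripping with a single comprehension that slices the list into chunks of six and joins each with ','.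
-- intended difference: When the list length is a positive multiple of 6 and the last member is empty or itself ends with ',', A's unconditional last-comma strip removes a character that belongs to the data, while B returns the plain comma-join of all six members of the last group, which is the intended query string. — e.g. on prepare_multiple_query_strings(["a", "b", "c", "d", "e", ""]): A returns ["a,b,c,d,e"], B returns ["a,b,c,d,e,"]
import Mathlib
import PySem

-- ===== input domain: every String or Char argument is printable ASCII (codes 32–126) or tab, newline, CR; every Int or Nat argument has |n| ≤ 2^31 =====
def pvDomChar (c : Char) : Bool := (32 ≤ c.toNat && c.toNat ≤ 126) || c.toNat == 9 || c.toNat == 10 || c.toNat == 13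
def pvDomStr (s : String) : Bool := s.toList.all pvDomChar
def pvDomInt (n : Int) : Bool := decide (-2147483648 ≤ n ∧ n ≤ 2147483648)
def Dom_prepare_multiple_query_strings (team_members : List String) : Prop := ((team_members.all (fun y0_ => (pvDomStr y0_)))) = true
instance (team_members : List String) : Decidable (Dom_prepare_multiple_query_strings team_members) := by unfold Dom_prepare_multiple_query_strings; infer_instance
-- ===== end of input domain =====

-- B replaces A's counter/accumulator loop by one comprehension over chunks of six joined with ','
-- (simpler); where A's end-of-loop comma strip removes a data character (see D_ below), B keeps it.

-- ===== PORT A =====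
-- one iteration of A's for-loop body; the counter is a Nat (it starts at 1 and only grows, and
-- Python's int((p - 1) / 6) / int((p - 2) / 6) on these nonnegative values are exactly Nat division)
def pvStepA (st : List String × Nat) (member : String) : List String × Nat :=
  let all_teammates := st.1
  let player_to_be_processed := st.2
  let member_string := if player_to_be_processed % 6 = 0 then member else member ++ ","
  let teammate_list_index := (player_to_be_processed - 1) / 6
  let all_teammates :=
    if teammate_list_index = all_teammates.length then all_teammates ++ [""] else all_teammates
  let all_teammates :=
    all_teammates.set teammate_list_index
      (all_teammates.getD teammate_list_index "" ++ member_string)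
  (all_teammates, player_to_be_processed + 1)

def prepare_multiple_query_strings (team_members : List String) : List String :=
  let st := team_members.foldl pvStepA ([], 1)
  let all_teammates := st.1
  let player_to_be_processed := st.2
  if all_teammates.length ≠ 0 then
    let last_id_string :=
      if player_to_be_processed > 1 then
        all_teammates.getD ((player_to_be_processed - 2) / 6) ""
      else all_teammates.getD 0 ""
    if PySem.Str.pyGet? last_id_string (-1) = some ',' then
      all_teammates.set ((player_to_be_processed - 2) / 6)
        (PySem.Str.slice last_id_string none (some (-1)))
    else all_teammates
  else all_teammates

-- ===== PORT B =====
def prepare_multiple_query_strings_alt (team_members : List String) : List String :=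
  let members := team_members
  (PySem.List.pyRange 0 (members.length : Int) 6).map
    (fun i => PySem.Str.join "," (PySem.List.slice members (some i) (some (i + 6))))

-- ===== PRECONDITION & SPEC =====
-- When the list length is a positive multiple of 6 and the last member is '' or itself ends with
-- ',', A's unconditional last-comma strip removes a character that belongs to the data, while B
-- returns the plain comma-join of all six members of the last group, which is the intended string.
def D_prepare_multiple_query_strings (team_members : List String) : Prop :=
  team_members ≠ [] ∧ team_members.length % 6 = 0 ∧
    (team_members.getLast? = some "" ∨
      (team_members.getLast?.bind (fun m => m.toList.getLast?)) = some ',')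
instance (team_members : List String) : Decidable (D_prepare_multiple_query_strings team_members) := by
  unfold D_prepare_multiple_query_strings; infer_instance

def Spec_prepare_multiple_query_strings (team_members : List String) (out : List String) : Prop :=
  ¬ D_prepare_multiple_query_strings team_members →
    out = prepare_multiple_query_strings_alt team_members
instance (team_members : List String) (out : List String) : Decidable (Spec_prepare_multiple_query_strings team_members out) := by
  unfold Spec_prepare_multiple_query_strings; infer_instance

def pvDiffWitness_prepare_multiple_query_strings : List String := ["a", "b", "c", "d", "e", ""]
def pvDiffWitnessOut_prepare_multiple_query_strings : (List String) × (List String) :=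
  (["a,b,c,d,e"], ["a,b,c,d,e,"])

-- ===== CLAIM (what is proved, stated in full; the proofs are below) =====
def Claim_unchanged_prepare_multiple_query_strings : Prop := ∀ (team_members : List String), Dom_prepare_multiple_query_strings team_members → Spec_prepare_multiple_query_strings team_members (prepare_multiple_query_strings team_members)
def Claim_changed_prepare_multiple_query_strings : Prop := Dom_prepare_multiple_query_strings (pvDiffWitness_prepare_multiple_query_strings) ∧ D_prepare_multiple_query_strings (pvDiffWitness_prepare_multiple_query_strings) ∧ prepare_multiple_query_strings (pvDiffWitness_prepare_multiple_query_strings) = pvDiffWitnessOut_prepare_multiple_query_strings.1 ∧ prepare_multiple_query_strings_alt (pvDiffWitness_prepare_multiple_query_strings) = pvDiffWitnessOut_prepare_multiple_query_strings.2 ∧ pvDiffWitnessOut_prepare_multiple_query_strings.1 ≠ pvDiffWitnessOut_prepare_multiple_query_strings.2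
def Claim_exact_prepare_multiple_query_strings : Prop := ∀ (team_members : List String), Dom_prepare_multiple_query_strings team_members → D_prepare_multiple_query_strings team_members → prepare_multiple_query_strings team_members ≠ prepare_multiple_query_strings_alt team_members

-- ===== LEMMAS AND PROOFS =====

def pvChunks (l : List String) : List String :=
  match l with
  | [] => []
  | m :: rest => PySem.Str.join "," ((m :: rest).take 6) :: pvChunks ((m :: rest).drop 6)
termination_by l.length
decreasing_by simp

def pvRunA : List String → String → Nat → List String
  | [], cur, j => if j = 0 then [] else [cur]
  | m :: rest, cur, j =>
      if j = 5 then (cur ++ m) :: pvRunA rest "" 0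
      else pvRunA rest (cur ++ (m ++ ",")) (j + 1)

def pvMark : List String → Bool → List String
  | [], _ => []
  | [x], b => [if b then x ++ "," else x]
  | x :: y :: rest, b => x :: pvMark (y :: rest) b

theorem pvGetD_append (l : List String) (x : String) : (l ++ [x]).getD l.length "" = x := by
  simp [List.getD]

theorem pvSet_append (l : List String) (x y : String) :
    (l ++ [x]).set l.length y = l ++ [y] := by
  rw [List.set_append_right _ _ (Nat.le_refl _)]; simp

theorem pvStepA_one (front : List String) (m : String) :
    pvStepA (front, 6 * front.length + 1) m = (front ++ [m ++ ","], 6 * front.length + 2) := by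
  simp only [pvStepA]
  rw [show (6 * front.length + 1 - 1) / 6 = front.length from by omega,
    if_pos rfl, if_neg (by omega), pvGetD_append, pvSet_append]
  simp

theorem pvStepA_mid (front : List String) (cur m : String) (j : Nat) (h1 : 1 ≤ j) (h4 : j ≤ 4) :
    pvStepA (front ++ [cur], 6 * front.length + j + 1) m
      = (front ++ [cur ++ (m ++ ",")], 6 * front.length + j + 2) := by
  simp only [pvStepA]
  rw [show (6 * front.length + j + 1 - 1) / 6 = front.length from by omega,
    if_neg (by simp), if_neg (by omega), pvGetD_append, pvSet_append]

theorem pvStepA_six (front : List String) (cur m : String) :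
    pvStepA (front ++ [cur], 6 * front.length + 6) m
      = (front ++ [cur ++ m], 6 * front.length + 7) := by
  simp only [pvStepA]
  rw [show (6 * front.length + 6 - 1) / 6 = front.length from by omega,
    if_neg (by simp), if_pos (by omega), pvGetD_append, pvSet_append]

theorem pvLoop (l : List String) : ∀ (front : List String) (cur : String) (j : Nat),
    j ≤ 5 → (j = 0 → cur = "") →
    l.foldl pvStepA (front ++ (if j = 0 then [] else [cur]), 6 * front.length + j + 1)
      = (front ++ pvRunA l cur j, 6 * front.length + j + 1 + l.length) := by
  induction l with
  | nil =>
    intro front cur j hj h0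
    by_cases hz : j = 0
    · subst hz; simp [pvRunA]
    · simp [pvRunA, hz]
  | cons m rest ih =>
    intro front cur j hj h0
    by_cases h5 : j = 5
    · subst h5
      rw [List.foldl_cons, if_neg (by omega),
        show 6 * front.length + 5 + 1 = 6 * front.length + 6 from rfl, pvStepA_six]
      have := ih (front ++ [cur ++ m]) "" 0 (by omega) (fun _ => rfl)
      rw [if_pos rfl, List.append_nil] at this
      rw [show 6 * front.length + 7 = 6 * (front ++ [cur ++ m]).length + 0 + 1 from by simp; omega,
        this]
      simp [pvRunA, List.append_assoc]
      omega
    · by_cases hz : j = 0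
      · subst hz
        have hc := h0 rfl; subst hc
        rw [List.foldl_cons, if_pos rfl, List.append_nil,
          show 6 * front.length + 0 + 1 = 6 * front.length + 1 from rfl, pvStepA_one]
        have := ih front ("" ++ (m ++ ",")) 1 (by omega) (by omega)
        rw [if_neg (by omega)] at this
        simp only [show ("" : String) ++ (m ++ ",") = m ++ "," from by simp] at this
        rw [show 6 * front.length + 2 = 6 * front.length + 1 + 1 from rfl, this]
        simp [pvRunA]
        omega
      · rw [List.foldl_cons, if_neg hz,
          pvStepA_mid front cur m j (by omega) (by omega)]
        have := ih front (cur ++ (m ++ ",")) (j + 1) (by omega) (by omega)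
        rw [if_neg (by omega)] at this
        rw [show 6 * front.length + j + 2 = 6 * front.length + (j + 1) + 1 from by omega, this]
        rw [show pvRunA (m :: rest) cur j = pvRunA rest (cur ++ (m ++ ",")) (j + 1) from by
          rw [pvRunA]; rw [if_neg h5]]
        simp only [Prod.mk.injEq, List.length_cons]
        exact ⟨by trivial, by omega⟩

theorem pvJoin_single (a : String) : PySem.Str.join "," [a] = a := by
  apply String.toList_inj.mp
  simp [PySem.Str.toList_join, PySem.Chars.join_singleton]

theorem pvJoin_cons (a b : String) (t : List String) :
    PySem.Str.join "," (a :: b :: t) = a ++ "," ++ PySem.Str.join "," (b :: t) := by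
  apply String.toList_inj.mp
  simp [PySem.Str.toList_join, PySem.Chars.join_cons_cons]

theorem pvChunks_ne_nil (l : List String) (h : l ≠ []) : pvChunks l ≠ [] := by
  cases l with
  | nil => exact absurd rfl h
  | cons m rest => rw [pvChunks]; simp

theorem pvRunA_eq (n : Nat) : ∀ l : List String, l.length ≤ n →
    pvRunA l "" 0 = pvMark (pvChunks l) (decide (l.length % 6 ≠ 0)) := by
  induction n with
  | zero =>
    intro l hl
    have hz : l = [] := by cases l <;> simp at hl ⊢
    subst hz; simp [pvRunA, pvChunks, pvMark]
  | succ n ih =>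
    intro l hl
    match l with
    | [] => simp [pvRunA, pvChunks, pvMark]
    | [a] => simp [pvRunA, pvChunks, pvMark, pvJoin_single]
    | [a, b] => simp [pvRunA, pvChunks, pvMark, pvJoin_cons, pvJoin_single, String.append_assoc]
    | [a, b, c] => simp [pvRunA, pvChunks, pvMark, pvJoin_cons, pvJoin_single, String.append_assoc]
    | [a, b, c, d] => simp [pvRunA, pvChunks, pvMark, pvJoin_cons, pvJoin_single, String.append_assoc]
    | [a, b, c, d, e] => simp [pvRunA, pvChunks, pvMark, pvJoin_cons, pvJoin_single, String.append_assoc]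
    | a :: b :: c :: d :: e :: f :: rest =>
      have hr : rest.length ≤ n := by simp at hl; omega
      have hm : (decide ((a :: b :: c :: d :: e :: f :: rest).length % 6 ≠ 0))
          = decide (rest.length % 6 ≠ 0) := by
        rw [decide_eq_decide]; simp; omega
      cases rest with
      | nil => simp [pvRunA, pvChunks, pvMark, pvJoin_cons, pvJoin_single, String.append_assoc]
      | cons r rs =>
        obtain ⟨x, xs, hx⟩ : ∃ x xs, pvChunks (r :: rs) = x :: xs := by
          cases hc : pvChunks (r :: rs) with
          | nil => exact absurd hc (pvChunks_ne_nil _ (by simp))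
          | cons x xs => exact ⟨x, xs, rfl⟩
        rw [show pvChunks (a :: b :: c :: d :: e :: f :: r :: rs)
            = PySem.Str.join "," [a, b, c, d, e, f] :: pvChunks (r :: rs) from by
          rw [pvChunks]; simp, hx, hm]
        rw [show pvRunA (a :: b :: c :: d :: e :: f :: r :: rs) "" 0
            = (((((("" ++ (a ++ ",")) ++ (b ++ ",")) ++ (c ++ ",")) ++ (d ++ ",")) ++ (e ++ ",") ++ f))
              :: pvRunA (r :: rs) "" 0 from by simp [pvRunA]]
        rw [pvMark]
        simp only [List.cons.injEq]
        exact ⟨by simp [pvJoin_cons, pvJoin_single, String.append_assoc],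
          by rw [ih (r :: rs) hr, hx]⟩

theorem pvChunks_len (n : Nat) : ∀ l : List String, l.length ≤ n →
    (pvChunks l).length = (l.length + 5) / 6 := by
  induction n with
  | zero =>
    intro l hl
    have hz : l = [] := by cases l <;> simp at hl ⊢
    subst hz; simp [pvChunks]
  | succ n ih =>
    intro l hl
    cases l with
    | nil => simp [pvChunks]
    | cons m rest =>
      rw [pvChunks]
      rw [List.length_cons, ih ((m :: rest).drop 6) (by simp at hl ⊢; omega)]
      simp
      omega

theorem pvMark_append (xs : List String) (x : String) (b : Bool) :
    pvMark (xs ++ [x]) b = xs ++ [if b then x ++ "," else x] := by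
  induction xs with
  | nil => simp [pvMark]
  | cons y ys ih =>
    cases hy : ys ++ [x] with
    | nil => simp at hy
    | cons z t =>
      rw [List.cons_append, hy, pvMark, ← hy, ih]
      simp

theorem pvAlt_closed (l : List String) :
    prepare_multiple_query_strings_alt l
      = (List.range ((l.length + 5) / 6)).map
          (fun j => PySem.Str.join "," ((l.drop (6 * j)).take 6)) := by
  unfold prepare_multiple_query_strings_alt
  dsimp only
  rcases Nat.eq_zero_or_pos l.length with h | h
  · rw [PySem.List.pyRange_of_pos _ _ (by norm_num)]
    simp [h]
  · rw [PySem.List.pyRange_of_pos _ _ (by norm_num), if_pos (by exact_mod_cast h)]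
    have hN : (((l.length : Int) - 0 + 6 - 1) / 6).toNat = (l.length + 5) / 6 := by omega
    rw [hN, List.map_map]
    refine List.map_congr_left (fun j hj => ?_)
    simp only [Function.comp_apply]
    rw [show (0 : Int) + 6 * (j : Int) = ((6 * j : Nat) : Int) from by push_cast; ring,
      show ((6 * j : Nat) : Int) + 6 = ((6 * j + 6 : Nat) : Int) from by push_cast; ring,
      PySem.List.slice_natCast]
    congr 2
    omega

theorem pvG_eq (n : Nat) : ∀ l : List String, l.length ≤ n →
    (List.range ((l.length + 5) / 6)).map
        (fun j => PySem.Str.join "," ((l.drop (6 * j)).take 6))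
      = pvChunks l := by
  induction n with
  | zero =>
    intro l hl
    have hz : l = [] := by cases l <;> simp at hl ⊢
    subst hz; simp [pvChunks]
  | succ n ih =>
    intro l hl
    cases l with
    | nil => simp [pvChunks]
    | cons m rest =>
      rw [pvChunks]
      have h1 : ((m :: rest).length + 5) / 6 = (((m :: rest).drop 6).length + 5) / 6 + 1 := by
        simp; omega
      rw [h1, List.range_succ_eq_map, List.map_cons, List.map_map]
      refine congrArg₂ List.cons (by simp) ?_
      rw [← ih ((m :: rest).drop 6) (by simp at hl ⊢; omega)]
      refine List.map_congr_left (fun j hj => ?_)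
      simp only [Function.comp_apply]
      congr 2
      rw [List.drop_drop]
      congr 1
      omega

theorem pvAlt_eq (l : List String) : prepare_multiple_query_strings_alt l = pvChunks l := by
  rw [pvAlt_closed, pvG_eq l.length l (Nat.le_refl _)]

theorem pvJoin_toList (c : List String) (m : String) (hc : c ≠ []) :
    (PySem.Str.join "," (c ++ [m])).toList
      = (PySem.Str.join "," c).toList ++ ',' :: m.toList := by
  induction c with
  | nil => exact absurd rfl hc
  | cons a t ih =>
    cases t with
    | nil => simp [pvJoin_cons, pvJoin_single]
    | cons b t' =>
      rw [List.cons_append, List.cons_append, pvJoin_cons]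
      rw [show b :: (t' ++ [m]) = (b :: t') ++ [m] from rfl]
      rw [pvJoin_cons a b t']
      simp only [String.toList_append]
      rw [ih (by simp)]
      simp [List.append_assoc]

theorem pvStr_toList_ne (m : String) (hm : m ≠ "") : m.toList ≠ [] := by
  intro h
  exact hm (String.toList_inj.mp (by simpa using h))

theorem pvLast_comma (s : String) : PySem.Str.pyGet? (s ++ ",") (-1) = some ',' := by
  simp [PySem.List.pyGet?_neg_one]

theorem pvSlice_comma (s : String) : PySem.Str.slice (s ++ ",") none (some (-1)) = s := by
  apply String.toList_inj.mp
  rw [PySem.Str.slice_to_neg_one]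
  simp

theorem pvGet_join (c0 : List String) (m : String) (hc : c0 ≠ []) (hm : m ≠ "") :
    PySem.Str.pyGet? (PySem.Str.join "," (c0 ++ [m])) (-1) = m.toList.getLast? := by
  have h1 := pvJoin_toList c0 m hc
  simp only [PySem.Str.pyGet?_eq, PySem.Chars.pyGet?_eq_listPyGet?, PySem.List.pyGet?_neg_one]
  rw [h1]
  rw [List.getLast?_append_of_ne_nil _ (by simp)]
  rw [show (',' : Char) :: m.toList = [','] ++ m.toList from rfl,
    List.getLast?_append_of_ne_nil _ (pvStr_toList_ne m hm)]

theorem pvGet_join_comma (c0 : List String) (m : String) (hc : c0 ≠ [])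
    (hm : m = "" ∨ m.toList.getLast? = some ',') :
    PySem.Str.pyGet? (PySem.Str.join "," (c0 ++ [m])) (-1) = some ',' := by
  have h1 := pvJoin_toList c0 m hc
  simp only [PySem.Str.pyGet?_eq, PySem.Chars.pyGet?_eq_listPyGet?, PySem.List.pyGet?_neg_one]
  rw [h1]
  rw [List.getLast?_append_of_ne_nil _ (by simp)]
  rcases hm with hm | hm
  · subst hm; simp
  · rw [show (',' : Char) :: m.toList = [','] ++ m.toList from rfl,
      List.getLast?_append_of_ne_nil _ (by intro h; simp [h] at hm), hm]

theorem pvLastChunk (n : Nat) : ∀ (l : List String) (m : String), l.length ≤ n →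
    l.getLast? = some m → l.length % 6 = 0 →
    ∃ c, c ≠ [] ∧ (pvChunks l).getLast? = some (PySem.Str.join "," (c ++ [m])) := by
  induction n with
  | zero =>
    intro l m hl hlast hmod
    cases l with
    | nil => simp at hlast
    | cons a t => simp at hl
  | succ n ih =>
    intro l m hl hlast hmod
    match l with
    | [] => simp at hlast
    | [a] => simp at hmod
    | [a, b] => simp at hmod
    | [a, b, c] => simp at hmod
    | [a, b, c, d] => simp at hmod
    | [a, b, c, d, e] => simp at hmod
    | a :: b :: c :: d :: e :: f :: rest =>
      cases rest with
      | nil =>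
        have hm : f = m := by simpa using hlast
        subst hm
        refine ⟨[a, b, c, d, e], by simp, ?_⟩
        rw [pvChunks]
        simp [pvChunks]
      | cons r rs =>
        have hlapp : a :: b :: c :: d :: e :: f :: r :: rs
            = [a, b, c, d, e, f] ++ (r :: rs) := by simp
        have hlast' : (r :: rs).getLast? = some m := by
          rw [← hlast, hlapp, List.getLast?_append_of_ne_nil _ (by simp)]
        obtain ⟨c0, hc0, hlc⟩ := ih (r :: rs) m (by simp at hl ⊢; omega) hlast'
          (by simp at hmod ⊢; omega)
        refine ⟨c0, hc0, ?_⟩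
        rw [pvChunks]
        rw [show ((a :: b :: c :: d :: e :: f :: r :: rs).drop 6) = r :: rs from by simp]
        rw [show (PySem.Str.join "," ((a :: b :: c :: d :: e :: f :: r :: rs).take 6)
              :: pvChunks (r :: rs))
            = [PySem.Str.join "," ((a :: b :: c :: d :: e :: f :: r :: rs).take 6)]
              ++ pvChunks (r :: rs) from rfl]
        rw [List.getLast?_append_of_ne_nil _ (pvChunks_ne_nil _ (by simp)), hlc]

theorem pv_main (l : List String) (hnd : ¬ D_prepare_multiple_query_strings l) :
    prepare_multiple_query_strings l = prepare_multiple_query_strings_alt l := by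
  by_cases hnil : l = []
  · subst hnil; decide
  · have hn1 : 1 ≤ l.length := List.length_pos_iff.mpr hnil
    have h0 := pvLoop l [] "" 0 (by omega) (fun _ => rfl)
    simp at h0
    unfold prepare_multiple_query_strings
    dsimp only
    rw [h0]
    dsimp only
    rw [pvAlt_eq l]
    have hcs := pvRunA_eq l.length l (Nat.le_refl _)
    have hne : pvChunks l ≠ [] := pvChunks_ne_nil l hnil
    have hsplit : pvChunks l = (pvChunks l).dropLast ++ [(pvChunks l).getLast hne] :=
      (List.dropLast_append_getLast hne).symm
    have hlen_cs : (pvChunks l).length = (l.length + 5) / 6 :=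
      pvChunks_len l.length l (Nat.le_refl _)
    have hinit : (pvChunks l).dropLast.length = (l.length - 1) / 6 := by
      rw [List.length_dropLast, hlen_cs]; omega
    rw [hsplit, pvMark_append] at hcs
    rw [hcs]
    rw [if_pos (show ((pvChunks l).dropLast
        ++ [if decide (l.length % 6 ≠ 0) then (pvChunks l).getLast hne ++ ","
            else (pvChunks l).getLast hne]).length ≠ 0 from by simp)]
    rw [if_pos (show 1 + l.length > 1 from by omega)]
    have hidx : (1 + l.length - 2) / 6 = (pvChunks l).dropLast.length := by
      rw [hinit]; omega
    rw [hidx, pvGetD_append]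
    by_cases hflag : l.length % 6 = 0
    · have hf : decide (l.length % 6 ≠ 0) = false := by simp [hflag]
      simp only [hf, Bool.false_eq_true, if_false]
      have hlast : l.getLast? = some (l.getLast hnil) := List.getLast?_eq_some_getLast hnil
      have hm1 : l.getLast hnil ≠ "" := fun h => hnd ⟨hnil, hflag, Or.inl (by rw [hlast, h])⟩
      have hm2 : (l.getLast hnil).toList.getLast? ≠ some ',' := fun h =>
        hnd ⟨hnil, hflag, Or.inr (by rw [hlast]; simpa using h)⟩
      obtain ⟨c0, hc0, hlc⟩ :=
        pvLastChunk l.length l (l.getLast hnil) (Nat.le_refl _) hlast hflag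
      have hlastc : (pvChunks l).getLast hne = PySem.Str.join "," (c0 ++ [l.getLast hnil]) := by
        have h2 := List.getLast?_eq_some_getLast hne
        rw [h2] at hlc
        exact Option.some_injective _ hlc
      rw [hlastc, if_neg (by rw [pvGet_join c0 _ hc0 hm1]; exact hm2), ← hlastc, ← hsplit]
    · have hf : decide (l.length % 6 ≠ 0) = true := by simpa using hflag
      simp only [hf, if_true]
      rw [if_pos (pvLast_comma ((pvChunks l).getLast hne)), pvSlice_comma, pvSet_append, ← hsplit]

theorem pv_tight (l : List String) (hd : D_prepare_multiple_query_strings l) :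
    prepare_multiple_query_strings l ≠ prepare_multiple_query_strings_alt l := by
  obtain ⟨hnil, hflag, hor⟩ := hd
  have hn1 : 1 ≤ l.length := List.length_pos_iff.mpr hnil
  have h0 := pvLoop l [] "" 0 (by omega) (fun _ => rfl)
  simp at h0
  unfold prepare_multiple_query_strings
  dsimp only
  rw [h0]
  dsimp only
  rw [pvAlt_eq l]
  have hcs := pvRunA_eq l.length l (Nat.le_refl _)
  have hne : pvChunks l ≠ [] := pvChunks_ne_nil l hnil
  have hsplit : pvChunks l = (pvChunks l).dropLast ++ [(pvChunks l).getLast hne] :=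
    (List.dropLast_append_getLast hne).symm
  have hlen_cs : (pvChunks l).length = (l.length + 5) / 6 :=
    pvChunks_len l.length l (Nat.le_refl _)
  have hinit : (pvChunks l).dropLast.length = (l.length - 1) / 6 := by
    rw [List.length_dropLast, hlen_cs]; omega
  rw [hsplit, pvMark_append] at hcs
  rw [hcs]
  rw [if_pos (show ((pvChunks l).dropLast
      ++ [if decide (l.length % 6 ≠ 0) then (pvChunks l).getLast hne ++ ","
          else (pvChunks l).getLast hne]).length ≠ 0 from by simp)]
  rw [if_pos (show 1 + l.length > 1 from by omega)]
  have hidx : (1 + l.length - 2) / 6 = (pvChunks l).dropLast.length := by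
    rw [hinit]; omega
  rw [hidx, pvGetD_append]
  have hf : decide (l.length % 6 ≠ 0) = false := by simp [hflag]
  simp only [hf, Bool.false_eq_true, if_false]
  have hlast : l.getLast? = some (l.getLast hnil) := List.getLast?_eq_some_getLast hnil
  have hor' : l.getLast hnil = "" ∨ (l.getLast hnil).toList.getLast? = some ',' := by
    rcases hor with h | h
    · left
      rw [hlast] at h
      exact Option.some_injective _ h
    · right
      rw [hlast] at h
      simpa using h
  obtain ⟨c0, hc0, hlc⟩ := pvLastChunk l.length l (l.getLast hnil) (Nat.le_refl _) hlast hflag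
  have hlastc : (pvChunks l).getLast hne = PySem.Str.join "," (c0 ++ [l.getLast hnil]) := by
    have h2 := List.getLast?_eq_some_getLast hne
    rw [h2] at hlc
    exact Option.some_injective _ hlc
  have hcomma : PySem.Str.pyGet? ((pvChunks l).getLast hne) (-1) = some ',' := by
    rw [hlastc]
    exact pvGet_join_comma c0 _ hc0 hor'
  rw [if_pos hcomma, pvSet_append]
  intro heq
  have h2 := heq.trans hsplit
  have h3 := List.append_cancel_left h2
  have h4 : PySem.Str.slice ((pvChunks l).getLast hne) none (some (-1))
      = (pvChunks l).getLast hne := by simpa using h3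
  have h5 := congrArg String.toList h4
  rw [PySem.Str.slice_to_neg_one] at h5
  have h6 : ((pvChunks l).getLast hne).toList.getLast? = some ',' := by
    simpa only [PySem.Str.pyGet?_eq, PySem.Chars.pyGet?_eq_listPyGet?,
      PySem.List.pyGet?_neg_one] using hcomma
  have h7 : ((pvChunks l).getLast hne).toList ≠ [] := by
    intro h
    rw [h] at h6
    simp at h6
  have h8 := congrArg List.length h5
  rw [List.length_dropLast] at h8
  have h9 : ((pvChunks l).getLast hne).toList.length ≠ 0 := by
    simpa [List.length_eq_zero_iff] using h7
  omega

-- ===== VERDICT (by name: the statement is the Claim_ definition above) =====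
theorem prepare_multiple_query_strings_spec : Claim_unchanged_prepare_multiple_query_strings := by
  intro team_members _dom
  unfold Spec_prepare_multiple_query_strings
  intro hnd
  exact pv_main team_members hnd

theorem prepare_multiple_query_strings_changed : Claim_changed_prepare_multiple_query_strings := by
  unfold Claim_changed_prepare_multiple_query_strings; decide

theorem prepare_multiple_query_strings_tight : Claim_exact_prepare_multiple_query_strings := by
  intro team_members _dom hd
  exact pv_tight team_members hd
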